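-- pv_equiv track=rewrite | github.com/G4tLan/fxbot | consolidation_breakout.py | candles_since_last_consolidation
-- ===== SOURCE A (Python) =====
-- def candles_since_last_consolidation(segments):
--     """
--     Returns the number of candles since the last consolidation segment (True).
--     If currently in consolidation, returns 0.
--     If no consolidation exists yet, returns total number of candles.
--     """
--     # Find last consolidation
--     last_true_index = None
--     for i in reversed(range(len(segments))):
--         if segments[i][0]:  # True segment found
--             last_true_index = i
--             break
--
--     if last_true_index is None:
--         # No consolidation at all → all candles count
--         return sum(length for _, length in segments)
--     elif last_true_index == len(segments) - 1:
--         # Last segment is consolidation → 0 candles since last consolidation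
--         return 0
--     else:
--         # Sum lengths of segments *after* last True
--         return sum(length for _, length in segments[last_true_index + 1:])
-- ===== SOURCE B (Python) =====
-- def candles_since_last_consolidation(segments):
--     """Single forward pass: reset the running count at each consolidation
--     segment, otherwise accumulate the segment length."""
--     acc = 0
--     for seg in segments:
--         if seg[0]:
--             acc = 0
--         else:
--             _, length = seg
--             acc += length
--     return acc
-- ===== Notes on version B (the rewrite author's own statement) =====
-- stated objective: simpler
-- what changed: Replaced the reverse index scan for the last True segment plus a branch over three suffix-sum cases by one forward loop with a single accumulator that resets to 0 at each True segment and otherwise adds the length.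
import Mathlib
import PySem

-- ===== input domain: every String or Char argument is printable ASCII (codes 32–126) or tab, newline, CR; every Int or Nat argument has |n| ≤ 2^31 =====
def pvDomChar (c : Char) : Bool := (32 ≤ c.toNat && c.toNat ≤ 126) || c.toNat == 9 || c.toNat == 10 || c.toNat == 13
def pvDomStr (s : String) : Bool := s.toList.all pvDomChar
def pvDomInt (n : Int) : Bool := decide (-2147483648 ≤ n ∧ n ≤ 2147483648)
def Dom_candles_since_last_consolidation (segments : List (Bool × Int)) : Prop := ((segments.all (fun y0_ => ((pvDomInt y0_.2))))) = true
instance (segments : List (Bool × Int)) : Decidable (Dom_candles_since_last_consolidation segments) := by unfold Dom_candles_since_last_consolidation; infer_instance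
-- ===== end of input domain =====

-- B replaces A's reverse index scan + suffix-sum branches by one forward pass with a resetting accumulator (objective: simpler).

-- ===== PORT A =====
-- the 'for i in reversed(range(len(segments)))' loop with break: first index in the list whose segment flag is True
def pvFindLastTrue (segs : List (Bool × Int)) : List Nat → Option Nat
  | [] => none
  | i :: rest =>
    match PySem.List.pyGet? segs (i : Int) with
    | some seg => if seg.1 then some i else pvFindLastTrue segs rest
    | none => none  -- unreachable: every i comes from range(len(segs))

-- sum(length for _, length in l)
def pvSumLen (l : List (Bool × Int)) : Int := l.foldl (fun s p => s + p.2) 0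

def candles_since_last_consolidation (segments : List (Bool × Int)) : Int :=
  let last_true_index := pvFindLastTrue segments ((List.range segments.length).reverse)
  match last_true_index with
  | none => pvSumLen segments
  | some i =>
    if i = segments.length - 1 then 0
    else pvSumLen (PySem.List.slice segments (some ((i : Int) + 1)) none)

-- ===== PORT B =====
def candles_since_last_consolidation_alt (segments : List (Bool × Int)) : Int :=
  segments.foldl (fun acc seg => if seg.1 then 0 else acc + seg.2) 0

-- ===== PRECONDITION & SPEC =====
def Spec_candles_since_last_consolidation (segments : List (Bool × Int)) (out : Int) : Prop := out = candles_since_last_consolidation_alt segments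
instance (segments : List (Bool × Int)) (out : Int) : Decidable (Spec_candles_since_last_consolidation segments out) := by unfold Spec_candles_since_last_consolidation; infer_instance

-- ===== CLAIM (what is proved, stated in full; the proofs are below) =====
def Claim_equal_candles_since_last_consolidation : Prop := ∀ (segments : List (Bool × Int)), Dom_candles_since_last_consolidation segments → Spec_candles_since_last_consolidation segments (candles_since_last_consolidation segments)

-- ===== LEMMAS AND PROOFS =====

theorem pvSumLen_append (xs : List (Bool × Int)) (x : Bool × Int) :
    pvSumLen (xs ++ [x]) = pvSumLen xs + x.2 := by
  show (xs ++ [x]).foldl (fun s p => s + p.2) 0 = pvSumLen xs + x.2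
  rw [List.foldl_append]
  exact congrArg (fun a => a + x.2) rfl

theorem pvFindLastTrue_mem {segs : List (Bool × Int)} {l : List Nat} {i : Nat}
    (h : pvFindLastTrue segs l = some i) : i ∈ l := by
  induction l with
  | nil => simp [pvFindLastTrue] at h
  | cons j rest ih =>
    simp only [pvFindLastTrue] at h
    cases hg : PySem.List.pyGet? segs (j : Int) with
    | none => simp [hg] at h
    | some seg =>
      simp only [hg] at h
      by_cases hs : seg.1 = true
      · simp [hs] at h; simp [h]
      · simp [hs] at h; exact List.mem_cons_of_mem _ (ih h)

theorem pvFindLastTrue_congr (xs : List (Bool × Int)) (x : Bool × Int) (l : List Nat)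
    (hl : ∀ i ∈ l, i < xs.length) :
    pvFindLastTrue (xs ++ [x]) l = pvFindLastTrue xs l := by
  induction l with
  | nil => rfl
  | cons j rest ih =>
    have hj : j < xs.length := hl j (List.mem_cons_self)
    have hget : PySem.List.pyGet? (xs ++ [x]) (j : Int) = PySem.List.pyGet? xs (j : Int) := by
      rw [PySem.List.pyGet?_natCast, PySem.List.pyGet?_natCast,
          List.getElem?_append_left hj]
    simp only [pvFindLastTrue, hget]
    cases hg : PySem.List.pyGet? xs (j : Int) with
    | none => rfl
    | some seg =>
      by_cases hs : seg.1 = true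
      · simp [hs]
      · simp only [hs, Bool.false_eq_true, if_false]
        exact ih (fun i hi => hl i (List.mem_cons_of_mem _ hi))

theorem pvSlice_succ_drop (l : List (Bool × Int)) (i : Nat) :
    PySem.List.slice l (some ((i : Int) + 1)) none = l.drop (i + 1) := by
  have : ((i : Int) + 1) = ((i + 1 : Nat) : Int) := by push_cast; ring
  rw [this, PySem.List.slice_from_natCast]

theorem A_concat (xs : List (Bool × Int)) (x : Bool × Int) :
    candles_since_last_consolidation (xs ++ [x]) =
      if x.1 then 0 else candles_since_last_consolidation xs + x.2 := by
  have hlen : (xs ++ [x]).length = xs.length + 1 := by simp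
  have hrange : (List.range (xs ++ [x]).length).reverse
      = xs.length :: (List.range xs.length).reverse := by
    simp [hlen, List.range_succ]
  have hget : PySem.List.pyGet? (xs ++ [x]) ((xs.length : Nat) : Int) = some x := by
    rw [PySem.List.pyGet?_natCast]; simp
  cases hx : x.1 with
  | true =>
    -- first probed index hits x, which is True → found index = len-1 → 0
    simp only [candles_since_last_consolidation, hrange, pvFindLastTrue, hget, hx, if_true]
    simp [hlen]
  | false =>
    -- x not True: the scan continues into xs
    have hcongr := pvFindLastTrue_congr xs x ((List.range xs.length).reverse)
      (by intro i hi; simpa using List.mem_range.mp (List.mem_reverse.mp hi))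
    simp only [candles_since_last_consolidation, hrange, pvFindLastTrue, hget, hx,
      Bool.false_eq_true, if_false, hcongr]
    cases hfind : pvFindLastTrue xs ((List.range xs.length).reverse) with
    | none => simp [pvSumLen_append]
    | some i =>
      have hi : i < xs.length := by
        have := pvFindLastTrue_mem hfind
        simpa using List.mem_range.mp (List.mem_reverse.mp this)
      have hne : ¬ i = (xs ++ [x]).length - 1 := by simp only [hlen]; omega
      simp only [if_neg hne, pvSlice_succ_drop]
      rw [List.drop_append_of_le_length (by omega), pvSumLen_append]
      by_cases hlast : i = xs.length - 1
      · have hnil : xs.drop (i + 1) = [] := List.drop_eq_nil_of_le (by omega)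
        simp [hnil, pvSumLen]
      · simp [if_neg hlast]

theorem B_concat (xs : List (Bool × Int)) (x : Bool × Int) :
    candles_since_last_consolidation_alt (xs ++ [x]) =
      if x.1 then 0 else candles_since_last_consolidation_alt xs + x.2 := by
  simp [candles_since_last_consolidation_alt, List.foldl_append]

theorem AB_eq (xs : List (Bool × Int)) :
    candles_since_last_consolidation xs = candles_since_last_consolidation_alt xs := by
  induction xs using List.reverseRecOn with
  | nil => rfl
  | append_singleton xs x ih => rw [A_concat, B_concat, ih]

-- ===== VERDICT (by name: the statement is the Claim_ definition above) =====
theorem candles_since_last_consolidation_spec : Claim_equal_candles_since_last_consolidation := by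
  intro segments _
  unfold Spec_candles_since_last_consolidation
  exact AB_eq segments
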